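-- pv_equiv track=rewrite | github.com/etfrogers/AdventOfCode | AOC2019/day4/day4.py | two_digits_same
-- ===== SOURCE A (Python) =====
-- def two_digits_same(password, part2):
--     dp = diff(password)
--     if part2:
--         ddp = diff(dp)
--         ddp = [-1] + ddp + [-1]
--         candidates = [i for i in range(len(dp)) if dp[i] == 0]
--         if not candidates:
--             valid = False
--         else:
--             valid = False
--             for candidate in candidates:
--                 if ddp[candidate] != 0 and ddp[candidate+1] != 0:
--                     valid = True
--         return valid
--     else:
--         return any([d == 0 for d in dp])
--
-- def diff(password):
--     return [int(password[i+1]) - int(password[i]) for i in range(len(password)-1)]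
-- ===== SOURCE B (Python) =====
-- def two_digits_same(password, part2):
--     # Run-length scan: group consecutive equal digits and check run lengths.
--     if len(password) < 2:
--         return False
--     digits = [int(c) for c in password]
--     runs = []
--     run = 1
--     for prev, cur in zip(digits, digits[1:]):
--         if cur == prev:
--             run += 1
--         else:
--             runs.append(run)
--             run = 1
--     runs.append(run)
--     if part2:
--         return 2 in runs
--     return any(r >= 2 for r in runs)
-- ===== Notes on version B (the rewrite author's own statement) =====
-- stated objective: simpler
-- what changed: B replaces A's double-difference list (diff of diff, padded with sentinels, plus an index/candidate scan) by a single run-length scan that groups consecutive equal digits and checks for a run of length exactly 2 (part2) or at least 2 (part1).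
import Mathlib
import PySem

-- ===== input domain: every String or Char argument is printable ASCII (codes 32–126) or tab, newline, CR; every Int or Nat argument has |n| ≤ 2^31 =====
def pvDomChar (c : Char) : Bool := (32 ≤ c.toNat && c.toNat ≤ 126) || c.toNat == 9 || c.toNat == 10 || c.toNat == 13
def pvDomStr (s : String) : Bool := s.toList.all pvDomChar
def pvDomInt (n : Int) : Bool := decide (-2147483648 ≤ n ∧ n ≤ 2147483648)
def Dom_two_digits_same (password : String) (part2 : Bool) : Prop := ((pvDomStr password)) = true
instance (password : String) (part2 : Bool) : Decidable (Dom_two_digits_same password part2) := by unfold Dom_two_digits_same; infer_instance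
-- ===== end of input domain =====

-- B replaces A's double-difference/candidate-index scan by a single run-length grouping scan
-- (objective: simpler); return values agree on all inputs where A returns (Pre_ below).

-- ===== PORT A =====
-- int(c) for a single digit character; Pre_ admits only digit characters (or length ≤ 1 strings)
def pvCharInt (c : Char) : Int := (c.toNat : Int) - 48

-- diff(password) applied to the password string (int() of each indexed character)
def pvDiffS (l : List Char) : List Int :=
  (List.range (l.length - 1)).map (fun i => pvCharInt (l.getD (i+1) '0') - pvCharInt (l.getD i '0'))

-- diff(dp) applied to a list of ints (int() is the identity there)
def pvDiffI (xs : List Int) : List Int :=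
  (List.range (xs.length - 1)).map (fun i => xs.getD (i+1) 0 - xs.getD i 0)

def two_digits_same (password : String) (part2 : Bool) : Bool :=
  let dp := pvDiffS password.toList
  if part2 then
    let ddp := pvDiffI dp
    let ddp2 : List Int := [-1] ++ ddp ++ [-1]
    let candidates := (List.range dp.length).filter (fun i => dp.getD i 0 == 0)
    if candidates.isEmpty then
      false
    else
      candidates.foldl
        (fun valid c => if ddp2.getD c 0 ≠ 0 ∧ ddp2.getD (c+1) 0 ≠ 0 then true else valid)
        false
  else
    dp.any (fun d => d == 0)

-- ===== PORT B =====
-- one step of B's run-length loop: extend the current run or close it and start a new one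
def pvStepB (st : List Nat × Nat) (pc : Int × Int) : List Nat × Nat :=
  if pc.2 == pc.1 then (st.1, st.2 + 1) else (st.1 ++ [st.2], 1)

def two_digits_same_alt (password : String) (part2 : Bool) : Bool :=
  if password.toList.length < 2 then false
  else
    let digits := password.toList.map pvCharInt
    let st := (digits.zip digits.tail).foldl pvStepB ([], 1)
    let runs := st.1 ++ [st.2]
    if part2 then runs.contains 2 else runs.any (fun r => decide (2 ≤ r))

-- ===== PRECONDITION & SPEC =====
-- Pre_ excludes exactly the inputs where the Python A raises ValueError: a string of length ≥ 2
-- containing a non-digit character (int() fails there; both A and B raise on those inputs).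
def pvDigitChar (c : Char) : Bool := 48 ≤ c.toNat && c.toNat ≤ 57

def Pre_two_digits_same (password : String) (part2 : Bool) : Prop :=
  password.toList.length ≤ 1 ∨ password.toList.all pvDigitChar = true
instance (password : String) (part2 : Bool) : Decidable (Pre_two_digits_same password part2) := by
  unfold Pre_two_digits_same; infer_instance

def pvWitness_two_digits_same : String × Bool := ("112233", true)

def Spec_two_digits_same (password : String) (part2 : Bool) (out : Bool) : Prop := out = two_digits_same_alt password part2
instance (password : String) (part2 : Bool) (out : Bool) : Decidable (Spec_two_digits_same password part2 out) := by unfold Spec_two_digits_same; infer_instance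

-- ===== CLAIM (what is proved, stated in full; the proofs are below) =====
def Claim_equal_two_digits_same : Prop := ∀ (password : String) (part2 : Bool), Dom_two_digits_same password part2 → Pre_two_digits_same password part2 → Spec_two_digits_same password part2 (two_digits_same password part2)

-- ===== LEMMAS AND PROOFS =====

-- reference predicate: q has an entry 0 at position i whose left neighbour (or `fl` at the left
-- border) and right neighbour (or the right border) are nonzero — an "isolated zero" of q
def IsoPr (fl : Prop) (q : List Int) : Prop :=
  ∃ i, i < q.length ∧ q.getD i 0 = 0 ∧
    (if i = 0 then fl else q.getD (i-1) 0 ≠ 0) ∧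
    (i + 1 = q.length ∨ q.getD (i+1) 0 ≠ 0)

-- boolean recursion computing IsoPr
def headNZ : List Int → Bool
  | [] => true
  | y :: _ => decide (y ≠ 0)

def isoB (fl : Bool) : List Int → Bool
  | [] => false
  | x :: q => (decide (x = 0) && fl && headNZ q) || isoB (decide (x ≠ 0)) q

-- "2 in runs": r is the length of the current run, the list is the remaining diffs
def cbB : Nat → List Int → Bool
  | r, [] => r == 2
  | r, x :: q => if x = 0 then cbB (r+1) q else ((r == 2) || cbB 1 q)

def F2 : List Int → Bool
  | [] => true
  | x :: q => if x = 0 then isoB false q else true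

def runsGo : Nat → List (Int × Int) → List Nat
  | r, [] => [r]
  | r, pc :: p => if pc.2 == pc.1 then runsGo (r+1) p else r :: runsGo 1 p

theorem eqB (a b : Bool) (h : a = true ↔ b = true) : a = b := by
  cases a <;> cases b <;> simp_all

theorem beqComm (a b : Nat) : (a == b) = (b == a) := by
  by_cases h : a = b
  · subst h; rfl
  · apply eqB; simp [h, Ne.symm h]

theorem pvDiffI_eq_zip (xs : List Int) :
    pvDiffI xs = (xs.zip xs.tail).map (fun pc => pc.2 - pc.1) := by
  apply List.ext_getElem
  · simp only [pvDiffI, List.length_map, List.length_range, List.length_zip, List.length_tail]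
    omega
  · intro i h1 h2
    simp only [pvDiffI, List.getElem_map, List.getElem_range, List.getElem_zip, List.getElem_tail]
    simp only [pvDiffI, List.length_map, List.length_range] at h1
    rw [List.getD_eq_getElem xs 0 (by omega), List.getD_eq_getElem xs 0 (by omega)]

theorem pvDiffS_eq (l : List Char) :
    pvDiffS l = pvDiffI (l.map pvCharInt) := by
  apply List.ext_getElem
  · simp [pvDiffS, pvDiffI]
  · intro i h1 h2
    simp only [pvDiffS, pvDiffI, List.length_map, List.getElem_map, List.getElem_range]
    simp only [pvDiffS, List.length_map, List.length_range] at h1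
    rw [List.getD_eq_getElem l '0' (by omega), List.getD_eq_getElem l '0' (by omega),
        List.getD_eq_getElem (l.map pvCharInt) 0 (by simp; omega),
        List.getD_eq_getElem (l.map pvCharInt) 0 (by simp; omega)]
    simp

theorem pvDiffI_length (xs : List Int) : (pvDiffI xs).length = xs.length - 1 := by
  simp [pvDiffI]

theorem pvDiffI_getD (xs : List Int) (j : Nat) (h : j < xs.length - 1) :
    (pvDiffI xs).getD j 0 = xs.getD (j+1) 0 - xs.getD j 0 := by
  rw [List.getD_eq_getElem _ 0 (by simp [pvDiffI_length]; omega)]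
  simp [pvDiffI]

theorem pad_getD (X : List Int) (j : Nat) :
    ((-1 : Int) :: (X ++ [-1])).getD j 0 =
      if j = 0 then -1 else if j - 1 < X.length then X.getD (j-1) 0
      else if j - 1 = X.length then -1 else 0 := by
  cases j with
  | zero => simp
  | succ k =>
    simp only [List.getD_cons_succ, Nat.succ_ne_zero, if_false, Nat.add_sub_cancel]
    by_cases hk : k < X.length
    · rw [if_pos hk, List.getD_eq_getElem (X ++ [-1]) 0 (by simp [List.length_append]; omega),
        List.getD_eq_getElem X 0 hk, List.getElem_append_left hk]
    · rw [if_neg hk]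
      by_cases he : k = X.length
      · subst he
        rw [if_pos rfl, List.getD_eq_getElem (X ++ [-1]) 0 (by simp)]
        simp
      · rw [if_neg he, List.getD_eq_default _ 0 (by simp; omega)]

theorem foldl_set_true (P : Nat → Prop) [DecidablePred P] :
    ∀ (cs : List Nat) (b : Bool),
      cs.foldl (fun v c => if P c then true else v) b = (b || cs.any (fun c => decide (P c))) := by
  intro cs
  induction cs with
  | nil => simp
  | cons c cs ih =>
    intro b
    simp only [List.foldl_cons, List.any_cons, ih]
    by_cases h : P c <;> simp [h]

-- A's part-2 block computes "q has an isolated zero"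
theorem A2_norm (q : List Int) :
    ((if ((List.range q.length).filter (fun i => q.getD i 0 == 0)).isEmpty then
        false
      else
        ((List.range q.length).filter (fun i => q.getD i 0 == 0)).foldl
          (fun valid c =>
            if (([-1] ++ pvDiffI q ++ [-1] : List Int)).getD c 0 ≠ 0 ∧
               (([-1] ++ pvDiffI q ++ [-1] : List Int)).getD (c+1) 0 ≠ 0 then true else valid)
          false) = true)
    ↔ IsoPr True q := by
  set X := pvDiffI q with hX
  set cand := (List.range q.length).filter (fun i => q.getD i 0 == 0) with hc
  have hfold : ∀ (b : Bool),
      cand.foldl (fun valid c =>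
        if (((-1 : Int) :: (X ++ [-1]))).getD c 0 ≠ 0 ∧
           (((-1 : Int) :: (X ++ [-1]))).getD (c+1) 0 ≠ 0 then true else valid) b
      = (b || cand.any (fun c => decide ((((-1 : Int) :: (X ++ [-1]))).getD c 0 ≠ 0 ∧
           (((-1 : Int) :: (X ++ [-1]))).getD (c+1) 0 ≠ 0))) :=
    foldl_set_true _ cand
  have hmain : (if cand.isEmpty then false else
      cand.foldl (fun valid c =>
        if (([-1] ++ X ++ [-1] : List Int)).getD c 0 ≠ 0 ∧
           (([-1] ++ X ++ [-1] : List Int)).getD (c+1) 0 ≠ 0 then true else valid) false)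
      = cand.any (fun c => decide ((((-1 : Int) :: (X ++ [-1]))).getD c 0 ≠ 0 ∧
           (((-1 : Int) :: (X ++ [-1]))).getD (c+1) 0 ≠ 0)) := by
    by_cases he : cand.isEmpty
    · rw [if_pos he]
      rw [List.isEmpty_iff] at he
      simp [he]
    · rw [if_neg he]
      simpa using hfold false
  rw [hmain]
  rw [List.any_eq_true]
  constructor
  · rintro ⟨c, hmem, hcond⟩
    rw [hc, List.mem_filter, List.mem_range] at hmem
    obtain ⟨hlt, hz⟩ := hmem
    rw [beq_iff_eq] at hz
    rw [decide_eq_true_iff] at hcond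
    obtain ⟨h1, h2⟩ := hcond
    rw [pad_getD] at h1 h2
    refine ⟨c, hlt, hz, ?_, ?_⟩
    · by_cases hc0 : c = 0
      · simp [hc0]
      · rw [if_neg hc0]
        rw [if_neg hc0, if_pos (by rw [hX, pvDiffI_length]; omega)] at h1
        rw [hX, pvDiffI_getD q (c-1) (by omega)] at h1
        have : c - 1 + 1 = c := by omega
        rw [this, hz] at h1
        intro hcontra; apply h1; rw [hcontra]; ring
    · by_cases hlast : c + 1 = q.length
      · exact Or.inl hlast
      · right
        rw [if_neg (by omega), if_pos (by rw [hX, pvDiffI_length]; omega),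
            Nat.add_sub_cancel] at h2
        rw [hX] at h2
        rw [pvDiffI_getD q c (by omega)] at h2
        rw [hz] at h2
        intro hcontra; apply h2; rw [hcontra]; ring
  · rintro ⟨i, hlt, hz, hl, hr⟩
    refine ⟨i, ?_, ?_⟩
    · rw [hc, List.mem_filter, List.mem_range]
      exact ⟨hlt, by rw [beq_iff_eq]; exact hz⟩
    · rw [decide_eq_true_iff]
      constructor
      · rw [pad_getD]
        by_cases hc0 : i = 0
        · simp [hc0]
        · rw [if_neg hc0, if_pos (by rw [hX, pvDiffI_length]; omega)]
          rw [hX, pvDiffI_getD q (i-1) (by omega)]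
          have : i - 1 + 1 = i := by omega
          rw [this, hz]
          rw [if_neg hc0] at hl
          intro hcontra
          apply hl
          have := sub_eq_zero.mp hcontra
          linarith [this]
      · rw [pad_getD]
        by_cases hlast : i + 1 = q.length
        · rw [if_neg (by omega), if_neg (by rw [hX, pvDiffI_length]; omega),
              if_pos (by rw [hX, pvDiffI_length]; omega)]
          norm_num
        · rcases hr with hr | hr
          · exact absurd hr hlast
          · rw [if_neg (by omega), if_pos (by rw [hX, pvDiffI_length]; omega),
                Nat.add_sub_cancel]
            rw [hX, pvDiffI_getD q i (by omega), hz]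
            intro hcontra
            apply hr
            have := sub_eq_zero.mp hcontra
            linarith [this]

theorem IsoPr_congr {fl fl' : Prop} (h : fl ↔ fl') (q : List Int) : IsoPr fl q ↔ IsoPr fl' q := by
  unfold IsoPr
  constructor
  all_goals
    rintro ⟨i, h1, h2, h3, h4⟩
    refine ⟨i, h1, h2, ?_, h4⟩
    by_cases hi : i = 0
    · rw [if_pos hi] at h3 ⊢; tauto
    · rwa [if_neg hi] at h3 ⊢

theorem IsoPr_cons (fl : Prop) (x : Int) (q : List Int) :
    IsoPr fl (x :: q) ↔ (x = 0 ∧ fl ∧ (q = [] ∨ q.getD 0 0 ≠ 0)) ∨ IsoPr (x ≠ 0) q := by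
  unfold IsoPr
  constructor
  · rintro ⟨i, h1, h2, h3, h4⟩
    cases i with
    | zero =>
      left
      simp only [List.getD_cons_zero] at h2
      rw [if_pos rfl] at h3
      refine ⟨h2, h3, ?_⟩
      rcases h4 with h4 | h4
      · left; simpa using h4
      · right; simpa using h4
    | succ i' =>
      right
      refine ⟨i', by simpa using h1, by simpa using h2, ?_, ?_⟩
      · cases i' with
        | zero => simpa using h3
        | succ k => simpa [Nat.succ_sub_one] using h3
      · rcases h4 with h4 | h4
        · left; simpa using h4
        · right; simpa using h4
  · rintro (⟨h2, h3, h4⟩ | ⟨i, h1, h2, h3, h4⟩)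
    · refine ⟨0, by simp, by simpa using h2, by simpa using h3, ?_⟩
      rcases h4 with h4 | h4
      · left; simp [h4]
      · right; simpa using h4
    · refine ⟨i + 1, by simpa using h1, by simpa using h2, ?_, ?_⟩
      · cases i with
        | zero => simpa using h3
        | succ k => simpa [Nat.succ_sub_one] using h3
      · rcases h4 with h4 | h4
        · left; simp only [List.length_cons]; omega
        · right; simpa using h4

theorem isoB_iff : ∀ (q : List Int) (fl : Bool), isoB fl q = true ↔ IsoPr (fl = true) q := by
  intro q
  induction q with
  | nil =>
    intro fl
    simp [isoB, IsoPr]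
  | cons x q ih =>
    intro fl
    rw [IsoPr_cons]
    rw [IsoPr_congr (show (x ≠ 0) ↔ (decide (x ≠ 0) = true) by simp) q]
    rw [← ih (decide (x ≠ 0))]
    simp only [isoB, Bool.or_eq_true, Bool.and_eq_true, decide_eq_true_iff]
    constructor
    · rintro (⟨⟨hx, hfl⟩, hm⟩ | h)
      · left
        refine ⟨hx, hfl, ?_⟩
        cases q with
        | nil => exact Or.inl rfl
        | cons y q' => right; simpa [headNZ] using hm
      · right; exact h
    · rintro (⟨hx, hfl, hm⟩ | h)
      · left
        refine ⟨⟨hx, hfl⟩, ?_⟩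
        cases q with
        | nil => simp [headNZ]
        | cons y q' =>
          rcases hm with hm | hm
          · exact absurd hm (by simp)
          · simpa [headNZ] using hm
      · right; exact h

theorem cbB_iso : ∀ q : List Int,
    (cbB 1 q = isoB true q) ∧ (cbB 2 q = F2 q) ∧ (∀ r, 3 ≤ r → cbB r q = isoB false q) := by
  intro q
  induction q with
  | nil =>
    refine ⟨by simp [cbB, isoB], by simp [cbB, F2], ?_⟩
    intro r hr
    simp only [cbB, isoB]
    exact beq_eq_false_iff_ne.mpr (by omega)
  | cons x q ih =>
    obtain ⟨ih1, ih2, ih3⟩ := ih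
    have hF2 : F2 q = (headNZ q || isoB false q) := by
      cases q with
      | nil => simp [F2, headNZ, isoB]
      | cons y q' =>
        simp only [F2, headNZ]
        by_cases hy : y = 0
        · simp [hy, isoB]
        · simp [hy, isoB]
    refine ⟨?_, ?_, ?_⟩
    · simp only [cbB, isoB]
      by_cases hx : x = 0
      · rw [if_pos hx, ih2, hF2]
        simp [hx]
      · rw [if_neg hx, ih1]
        simp [hx]
    · simp only [cbB, F2]
      by_cases hx : x = 0
      · rw [if_pos hx, if_pos hx, ih3 3 (by omega)]
      · rw [if_neg hx, if_neg hx]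
        simp
    · intro r hr
      simp only [cbB, isoB]
      by_cases hx : x = 0
      · rw [if_pos hx, ih3 (r+1) (by omega)]
        simp [hx]
      · rw [if_neg hx, ih1]
        simp [hx, show r ≠ 2 by omega]

theorem fold_prefix : ∀ (p : List (Int × Int)) (acc : List Nat) (r : Nat),
    List.foldl pvStepB (acc, r) p
      = (acc ++ (List.foldl pvStepB ([], r) p).1, (List.foldl pvStepB ([], r) p).2) := by
  intro p
  induction p with
  | nil => intro acc r; simp
  | cons pc p ih =>
    intro acc r
    simp only [List.foldl_cons, pvStepB]
    by_cases h : pc.2 = pc.1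
    · simp only [if_pos (beq_iff_eq.mpr h)]
      exact ih acc (r + 1)
    · simp only [if_neg (fun hc => h (beq_iff_eq.mp hc)), List.nil_append]
      rw [ih (acc ++ [r]) 1, ih [r] 1]
      simp

theorem fold_runs : ∀ (p : List (Int × Int)) (r : Nat),
    (List.foldl pvStepB ([], r) p).1 ++ [(List.foldl pvStepB ([], r) p).2] = runsGo r p := by
  intro p
  induction p with
  | nil => intro r; simp [runsGo]
  | cons pc p ih =>
    intro r
    simp only [List.foldl_cons, pvStepB, runsGo]
    by_cases h : pc.2 = pc.1
    · simp only [if_pos (beq_iff_eq.mpr h)]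
      exact ih (r + 1)
    · simp only [if_neg (fun hc => h (beq_iff_eq.mp hc)), List.nil_append]
      rw [fold_prefix p [r] 1]
      simp [ih 1]

theorem runsGo_contains2 : ∀ (p : List (Int × Int)) (r : Nat),
    (runsGo r p).contains 2 = cbB r (p.map (fun pc => pc.2 - pc.1)) := by
  intro p
  induction p with
  | nil =>
    intro r
    simp only [runsGo, List.contains_cons, List.contains_nil, Bool.or_false]
    exact beqComm 2 r
  | cons pc p ih =>
    intro r
    simp only [runsGo, List.map_cons, cbB]
    by_cases h : pc.2 = pc.1
    · rw [if_pos (beq_iff_eq.mpr h), if_pos (by rw [h]; ring), ih]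
    · rw [if_neg (fun hc => h (beq_iff_eq.mp hc)), if_neg (by intro hc; exact h (by linarith [sub_eq_zero.mp hc]))]
      simp only [List.contains_cons, ih]
      rw [beqComm]

theorem runsGo_any2 : ∀ (p : List (Int × Int)) (r : Nat), 1 ≤ r →
    (runsGo r p).any (fun x => decide (2 ≤ x))
      = (decide (2 ≤ r) || p.any (fun pc => pc.2 == pc.1)) := by
  intro p
  induction p with
  | nil => intro r _; simp [runsGo]
  | cons pc p ih =>
    intro r hr
    simp only [runsGo, List.any_cons]
    by_cases h : pc.2 = pc.1
    · rw [if_pos (beq_iff_eq.mpr h), ih (r+1) (by omega)]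
      simp [h, show (2 : Nat) ≤ r + 1 by omega]
    · rw [if_neg (fun hc => h (beq_iff_eq.mp hc))]
      simp only [List.any_cons, ih 1 (by omega)]
      simp [beq_eq_false_iff_ne.mpr h]

theorem zip_tail_nil_of_short (d : List Int) (h : d.length < 2) : d.zip d.tail = [] := by
  match d, h with
  | [], _ => rfl
  | [x], _ => rfl

-- ===== VERDICT (by name: the statement is the Claim_ definition above) =====
theorem two_digits_same_spec : Claim_equal_two_digits_same := by
  intro password part2 _ _
  unfold Spec_two_digits_same two_digits_same two_digits_same_alt
  set l := password.toList with hl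
  set d := l.map pvCharInt with hd
  set p := d.zip d.tail with hp
  have hdp : pvDiffS l = p.map (fun pc => pc.2 - pc.1) := by
    rw [pvDiffS_eq, pvDiffI_eq_zip]
  cases part2 with
  | false =>
    simp only [if_neg (Bool.false_ne_true), hdp]
    by_cases hlen : l.length < 2
    · rw [if_pos hlen]
      rw [zip_tail_nil_of_short d (by simp [hd]; omega)] at hp
      simp [hp]
    · rw [if_neg hlen, fold_runs, runsGo_any2 _ 1 (by omega)]
      apply eqB
      simp [List.any_map, List.any_eq_true, sub_eq_zero]
      rw [hp]
  | true =>
    simp only [if_true]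
    by_cases hlen : l.length < 2
    · rw [if_pos hlen]
      apply eqB
      rw [hdp, hp, zip_tail_nil_of_short d (by simp [hd]; omega)]
      simp
    · rw [if_neg hlen, fold_runs, runsGo_contains2, ← hdp, (cbB_iso (pvDiffS l)).1]
      apply eqB
      rw [A2_norm (pvDiffS l), isoB_iff (pvDiffS l) true]
      exact IsoPr_congr (by simp) (pvDiffS l)
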